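-- pv_equiv track=rewrite | github.com/jcamacho611/lwa-app | lwa-backend/app/services/director_brain_algorithm.py | score_safety
-- ===== SOURCE A (Python) =====
-- UNSAFE_CLAIM_TERMS: tuple[str, ...] = (
--     "guaranteed viral",
--     "guaranteed income",
--     "guaranteed money",
--     "risk-free income",
--     "investment return",
--     "roi guaranteed",
-- )
--
-- def clamp_score(value: int) -> int:
--     return max(0, min(100, int(value)))
--
-- def score_safety(text: str) -> tuple[int, bool, list[str]]:
--     lowered = text.lower()
--     notes: list[str] = []
--     safe = True
--     score = 90
--     for term in UNSAFE_CLAIM_TERMS: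
--         if term in lowered:
--             safe = False
--             score -= 25
--             notes.append("Remove unsupported guarantee language.")
--     return clamp_score(score), safe, notes
-- ===== SOURCE B (Python) =====
-- UNSAFE_CLAIM_TERMS: tuple[str, ...] = (
--     "guaranteed viral",
--     "guaranteed income",
--     "guaranteed money",
--     "risk-free income",
--     "investment return",
--     "roi guaranteed",
-- )
--
-- def score_safety(text: str) -> tuple[int, bool, list[str]]:
--     # One sweep over the text: at each position, see which terms start there.
--     lowered = text.lower()
--     matched = set()
--     for i in range(len(lowered)):
--         for term in UNSAFE_CLAIM_TERMS:
--             if term not in matched and lowered.startswith(term, i):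
--                 matched.add(term)
--     count = len(matched)
--     return max(0, 90 - 25 * count), count == 0, ["Remove unsupported guarantee language."] * count
-- ===== Notes on version B (the rewrite author's own statement) =====
-- stated objective: alternative
-- what changed: Replaces A's term-by-term substring membership tests with a single position-first sweep over the text that checks startswith at every index and collects matched terms into a set, then derives score/safe/notes in closed form from the set's size.
import Mathlib
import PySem

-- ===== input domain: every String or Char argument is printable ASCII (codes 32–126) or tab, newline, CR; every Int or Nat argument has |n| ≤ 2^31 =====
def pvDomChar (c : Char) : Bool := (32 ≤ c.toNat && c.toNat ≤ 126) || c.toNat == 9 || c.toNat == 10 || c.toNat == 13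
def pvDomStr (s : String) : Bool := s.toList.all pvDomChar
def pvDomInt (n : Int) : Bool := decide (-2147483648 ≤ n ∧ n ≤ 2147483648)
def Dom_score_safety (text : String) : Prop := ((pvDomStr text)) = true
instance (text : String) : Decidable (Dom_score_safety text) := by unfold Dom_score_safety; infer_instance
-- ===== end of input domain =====

-- B replaces A's term-by-term substring tests with a single position-first sweep over the
-- text that collects the matched terms into a set, then derives score/safe/notes from its size
-- (alternative algorithm, same asymptotic cost).

-- ===== PORT A =====
def UNSAFE_CLAIM_TERMS : List String :=
  ["guaranteed viral", "guaranteed income", "guaranteed money",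
   "risk-free income", "investment return", "roi guaranteed"]

def clamp_score (value : Int) : Int := max 0 (min 100 value)

def score_safety (text : String) : Int × Bool × List String :=
  let lowered := PySem.Str.lower text
  let st := UNSAFE_CLAIM_TERMS.foldl
    (fun (acc : List String × Bool × Int) term =>
      if PySem.Str.isIn term lowered then
        (acc.1 ++ ["Remove unsupported guarantee language."], false, acc.2.2 - 25)
      else acc)
    ([], true, 90)
  (clamp_score st.2.2, st.2.1, st.1)

-- ===== PORT B =====
-- inner loop body of B: at position i, add every not-yet-matched term that starts there
-- (Python 'lowered.startswith(term, i)' with 0 ≤ i ≤ len is exactly 'term is a prefix of lowered[i:]')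
def scanPos (L : List Char) (s : PySem.Set String) (i : Nat) : PySem.Set String :=
  UNSAFE_CLAIM_TERMS.foldl
    (fun s term =>
      if !(PySem.Set.contains s term) && PySem.Chars.startswith (L.drop i) term.toList then
        PySem.Set.add s term
      else s) s

def score_safety_alt (text : String) : Int × Bool × List String :=
  let lowered := (PySem.Str.lower text).toList
  let matched := (List.range lowered.length).foldl (scanPos lowered) PySem.Set.empty
  let count := matched.length
  (max 0 (90 - 25 * (count : Int)), count == 0,
   List.replicate count "Remove unsupported guarantee language.")

-- ===== PRECONDITION & SPEC =====
def Spec_score_safety (text : String) (out : Int × Bool × List String) : Prop := out = score_safety_alt text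
instance (text : String) (out : Int × Bool × List String) : Decidable (Spec_score_safety text out) := by unfold Spec_score_safety; infer_instance

-- ===== CLAIM =====
def Claim_equal_score_safety : Prop := ∀ (text : String), Dom_score_safety text → Spec_score_safety text (score_safety text)

-- ===== LEMMAS AND PROOFS =====

lemma terms_nonempty (t : String) (ht : t ∈ UNSAFE_CLAIM_TERMS) : t.toList ≠ [] := by
  fin_cases ht <;> decide

lemma mem_foldl_scan (ts : List String) (L : List Char) (i : Nat) (s : PySem.Set String) (x : String) :
    x ∈ ts.foldl
      (fun s term =>
        if !(PySem.Set.contains s term) && PySem.Chars.startswith (L.drop i) term.toList then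
          PySem.Set.add s term
        else s) s
    ↔ x ∈ s ∨ (x ∈ ts ∧ PySem.Chars.startswith (L.drop i) x.toList = true) := by
  induction ts generalizing s with
  | nil => simp
  | cons t ts ih =>
    simp only [List.foldl_cons, List.mem_cons]
    by_cases hc : t ∈ s <;>
      by_cases hs : PySem.Chars.startswith (L.drop i) t.toList = true <;>
        rw [ih] <;>
        simp [hc, hs] <;>
        aesop

lemma nodup_foldl_scan (ts : List String) (L : List Char) (i : Nat) (s : PySem.Set String)
    (h : s.Nodup) :
    (ts.foldl
      (fun s term =>
        if !(PySem.Set.contains s term) && PySem.Chars.startswith (L.drop i) term.toList then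
          PySem.Set.add s term
        else s) s).Nodup := by
  induction ts generalizing s with
  | nil => exact h
  | cons t ts ih =>
    simp only [List.foldl_cons]
    apply ih
    split
    · exact PySem.Set.nodup_add _ _ h
    · exact h

lemma mem_scan_range (L : List Char) (n : Nat) (s : PySem.Set String) (x : String) :
    x ∈ (List.range n).foldl (scanPos L) s
    ↔ x ∈ s ∨ (x ∈ UNSAFE_CLAIM_TERMS ∧ ∃ i < n, PySem.Chars.startswith (L.drop i) x.toList = true) := by
  induction n generalizing s with
  | zero => simp
  | succ n ih =>
    rw [List.range_succ, List.foldl_append]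
    simp only [List.foldl_cons, List.foldl_nil]
    rw [scanPos, mem_foldl_scan]
    rw [ih]
    constructor
    · rintro ((h | ⟨hm, i, hi, hs⟩) | ⟨hm, hs⟩)
      · exact Or.inl h
      · exact Or.inr ⟨hm, i, Nat.lt_succ_of_lt hi, hs⟩
      · exact Or.inr ⟨hm, n, Nat.lt_succ_self n, hs⟩
    · rintro (h | ⟨hm, i, hi, hs⟩)
      · exact Or.inl (Or.inl h)
      · rcases Nat.lt_succ_iff_lt_or_eq.mp hi with hi | rfl
        · exact Or.inl (Or.inr ⟨hm, i, hi, hs⟩)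
        · exact Or.inr ⟨hm, hs⟩

lemma nodup_scan_range (L : List Char) (n : Nat) (s : PySem.Set String) (h : s.Nodup) :
    ((List.range n).foldl (scanPos L) s).Nodup := by
  induction n generalizing s with
  | zero => exact h
  | succ n ih =>
    rw [List.range_succ, List.foldl_append]
    simp only [List.foldl_cons, List.foldl_nil]
    exact nodup_foldl_scan _ _ _ _ (ih s h)

-- a nonempty list is an infix iff it is a prefix of some proper-position suffix
lemma infix_iff_prefix_drop (t L : List Char) (ht : t ≠ []) :
    t <:+: L ↔ ∃ i < L.length, t <+: L.drop i := by
  constructor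
  · rintro ⟨u, v, rfl⟩
    refine ⟨u.length, ?_, ?_⟩
    · have h1 : 0 < t.length := List.length_pos_of_ne_nil ht
      simp only [List.length_append]
      omega
    · rw [List.append_assoc, List.drop_left' rfl]
      exact ⟨v, rfl⟩
  · rintro ⟨i, _, hp⟩
    exact hp.isInfix.trans (L.drop_suffix i).isInfix

lemma matched_length (L : List Char) :
    ((List.range L.length).foldl (scanPos L) PySem.Set.empty).length
    = UNSAFE_CLAIM_TERMS.countP (fun t => PySem.Chars.isIn t.toList L) := by
  rw [List.countP_eq_length_filter]
  apply List.Perm.length_eq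
  rw [List.perm_ext_iff_of_nodup (nodup_scan_range L L.length PySem.Set.empty List.nodup_nil)
    (List.Nodup.filter _ (by decide : UNSAFE_CLAIM_TERMS.Nodup))]
  intro x
  rw [mem_scan_range, List.mem_filter]
  simp only [PySem.Set.empty, List.not_mem_nil, false_or]
  constructor
  · rintro ⟨hm, i, hi, hs⟩
    refine ⟨hm, ?_⟩
    rw [PySem.Chars.isIn_iff_infix]
    exact (infix_iff_prefix_drop x.toList L (terms_nonempty x hm)).mpr
      ⟨i, hi, (PySem.Chars.startswith_iff _ _).mp hs⟩
  · rintro ⟨hm, hin⟩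
    refine ⟨hm, ?_⟩
    have ht : x.toList ≠ [] := terms_nonempty x hm
    rcases (infix_iff_prefix_drop x.toList L ht).mp ((PySem.Chars.isIn_iff_infix _ _).mp hin)
      with ⟨i, hi, hp⟩
    exact ⟨i, hi, (PySem.Chars.startswith_iff _ _).mpr hp⟩

-- ===== VERDICT =====
theorem score_safety_spec : Claim_equal_score_safety := by
  intro text _
  show score_safety text = score_safety_alt text
  rw [score_safety_alt]
  simp only [matched_length]
  simp only [score_safety, UNSAFE_CLAIM_TERMS, clamp_score,
    List.foldl, List.countP, List.countP.go, PySem.Str.isIn_eq]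
  generalize PySem.Chars.isIn "guaranteed viral".toList (PySem.Str.lower text).toList = b1
  generalize PySem.Chars.isIn "guaranteed income".toList (PySem.Str.lower text).toList = b2
  generalize PySem.Chars.isIn "guaranteed money".toList (PySem.Str.lower text).toList = b3
  generalize PySem.Chars.isIn "risk-free income".toList (PySem.Str.lower text).toList = b4
  generalize PySem.Chars.isIn "investment return".toList (PySem.Str.lower text).toList = b5
  generalize PySem.Chars.isIn "roi guaranteed".toList (PySem.Str.lower text).toList = b6
  revert b1 b2 b3 b4 b5 b6
  decide
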